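-- pv_equiv track=rewrite | github.com/benjaminlu34/agent-dashboard | apps/runner/runner.py | _normalize_scope_path
-- ===== SOURCE A (Python) =====
-- from typing import Any, Dict, List, Optional, Tuple
--
-- def _normalize_scope_path(value: Any) -> str:
--     if not isinstance(value, str) or not value.strip():
--         return ""
--     normalized = value.strip().replace("\\", "/")
--     while normalized.startswith("./"):
--         normalized = normalized[2:]
--     while normalized.startswith("/"):
--         normalized = normalized[1:]
--     while normalized.endswith("/") and len(normalized) > 1:
--         normalized = normalized[:-1]
--     return normalized
-- ===== SOURCE B (Python) =====
-- def _normalize_scope_path(value):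
--     if not isinstance(value, str) or not value.strip():
--         return ""
--     normalized = value.strip().replace("\\", "/")
--     n = len(normalized)
--     i = 0
--     while i + 1 < n and normalized[i] == "." and normalized[i + 1] == "/":
--         i += 2
--     while i < n and normalized[i] == "/":
--         i += 1
--     j = n
--     while j - i > 1 and normalized[j - 1] == "/":
--         j -= 1
--     return normalized[i:j]
-- ===== Notes on version B (the rewrite author's own statement) =====
-- stated objective: alternative
-- what changed: Replaces A's three while loops that repeatedly reslice and reassign the string by two index computations (a start index past leading './' pairs and '/'s, an end index before trailing '/'s with a lone-'/' guard) over the fixed normalized string, returning a single slice.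
import Mathlib
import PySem

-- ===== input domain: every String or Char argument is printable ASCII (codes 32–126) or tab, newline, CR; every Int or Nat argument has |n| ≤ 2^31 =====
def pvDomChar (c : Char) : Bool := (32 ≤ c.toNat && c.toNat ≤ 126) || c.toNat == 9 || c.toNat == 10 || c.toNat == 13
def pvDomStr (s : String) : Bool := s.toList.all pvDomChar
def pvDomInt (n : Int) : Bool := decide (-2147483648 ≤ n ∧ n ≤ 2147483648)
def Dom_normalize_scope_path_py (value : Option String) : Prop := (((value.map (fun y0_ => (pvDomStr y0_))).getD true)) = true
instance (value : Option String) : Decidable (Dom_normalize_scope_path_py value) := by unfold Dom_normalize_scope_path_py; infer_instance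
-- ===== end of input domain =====

-- B replaces A's three string-reassigning while loops by two index computations over the
-- fixed normalized string and returns a single slice (objective: alternative decomposition).

-- ===== PORT A =====
-- while normalized.startswith("./"): normalized = normalized[2:]
def aDropDotSlash : List Char → List Char
  | c1 :: c2 :: rest => if c1 = '.' ∧ c2 = '/' then aDropDotSlash rest else c1 :: c2 :: rest
  | l => l

-- while normalized.startswith("/"): normalized = normalized[1:]
def aDropSlash : List Char → List Char
  | c :: rest => if c = '/' then aDropSlash rest else c :: rest
  | [] => []

-- while normalized.endswith("/") and len(normalized) > 1: normalized = normalized[:-1]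
def aDropTrailing (l : List Char) : List Char :=
  if 1 < l.length ∧ l.getLast? = some '/' then aDropTrailing l.dropLast else l
termination_by l.length
decreasing_by simp [List.length_dropLast]; omega

def normalize_scope_path_py (value : Option String) : String :=
  match value with
  | none => ""  -- not isinstance(value, str)
  | some s =>
    if PySem.Str.strip s = "" then ""  -- not value.strip()
    else
      let normalized := PySem.Str.replace (PySem.Str.strip s) "\\" "/"
      String.ofList (aDropTrailing (aDropSlash (aDropDotSlash normalized.toList)))

-- ===== PORT B =====
-- while i + 1 < n and normalized[i] == "." and normalized[i+1] == "/": i += 2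
def bSkipDotSlash (cs : List Char) (i : Nat) : Nat :=
  if i + 1 < cs.length ∧ cs[i]? = some '.' ∧ cs[i + 1]? = some '/' then
    bSkipDotSlash cs (i + 2)
  else i
termination_by cs.length - i
decreasing_by omega

-- while i < n and normalized[i] == "/": i += 1
def bSkipSlash (cs : List Char) (i : Nat) : Nat :=
  if i < cs.length ∧ cs[i]? = some '/' then bSkipSlash cs (i + 1) else i
termination_by cs.length - i
decreasing_by omega

-- while j - i > 1 and normalized[j-1] == "/": j -= 1
def bShrink (cs : List Char) (i j : Nat) : Nat :=
  if i + 1 < j ∧ cs[j - 1]? = some '/' then bShrink cs i (j - 1) else j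
termination_by j
decreasing_by omega

def normalize_scope_path_py_alt (value : Option String) : String :=
  match value with
  | none => ""
  | some s =>
    if PySem.Str.strip s = "" then ""
    else
      let cs := (PySem.Str.replace (PySem.Str.strip s) "\\" "/").toList
      let i := bSkipSlash cs (bSkipDotSlash cs 0)
      let j := bShrink cs i cs.length
      String.ofList (PySem.List.slice cs (some (i : Int)) (some (j : Int)))  -- normalized[i:j]

-- ===== PRECONDITION & SPEC =====
def Spec_normalize_scope_path_py (value : Option String) (out : String) : Prop := out = normalize_scope_path_py_alt value
instance (value : Option String) (out : String) : Decidable (Spec_normalize_scope_path_py value out) := by unfold Spec_normalize_scope_path_py; infer_instance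

-- ===== CLAIM (what is proved, stated in full; the proofs are below) =====
def Claim_equal_normalize_scope_path_py : Prop := ∀ (value : Option String), Dom_normalize_scope_path_py value → Spec_normalize_scope_path_py value (normalize_scope_path_py value)

-- ===== LEMMAS AND PROOFS =====

lemma skipDotSlash_bounds (cs : List Char) (i : Nat) :
    i ≤ cs.length → i ≤ bSkipDotSlash cs i ∧ bSkipDotSlash cs i ≤ cs.length := by
  induction i using bSkipDotSlash.induct (cs := cs) with
  | case1 i hc ih =>
    intro h
    rw [bSkipDotSlash, if_pos hc]
    have := ih (by omega)
    omega
  | case2 i hc =>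
    intro h
    rw [bSkipDotSlash, if_neg hc]
    omega

lemma skipSlash_bounds (cs : List Char) (i : Nat) :
    i ≤ cs.length → i ≤ bSkipSlash cs i ∧ bSkipSlash cs i ≤ cs.length := by
  induction i using bSkipSlash.induct (cs := cs) with
  | case1 i hc ih =>
    intro h
    rw [bSkipSlash, if_pos hc]
    have := ih (by omega)
    omega
  | case2 i hc =>
    intro h
    rw [bSkipSlash, if_neg hc]
    omega

lemma dropDotSlash_eq (cs : List Char) (i : Nat) :
    aDropDotSlash (cs.drop i) = cs.drop (bSkipDotSlash cs i) := by
  induction i using bSkipDotSlash.induct (cs := cs) with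
  | case1 i hc ih =>
    obtain ⟨h1, h2, h3⟩ := hc
    have e2 : cs[i]'(by omega) = '.' := by
      have h' := h2
      rw [List.getElem?_eq_getElem (by omega)] at h'
      simpa using h'
    have e3 : cs[i + 1]'(by omega) = '/' := by
      have h' := h3
      rw [List.getElem?_eq_getElem (by omega)] at h'
      simpa using h'
    have hd : cs.drop i = '.' :: '/' :: cs.drop (i + 2) := by
      rw [List.drop_eq_getElem_cons (show i < cs.length by omega),
          List.drop_eq_getElem_cons (show i + 1 < cs.length by omega)]
      simp [e2, e3]
    rw [hd]
    have hstep : aDropDotSlash ('.' :: '/' :: cs.drop (i + 2)) = aDropDotSlash (cs.drop (i + 2)) := by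
      simp [aDropDotSlash]
    have hbe : bSkipDotSlash cs i = bSkipDotSlash cs (i + 2) := by
      conv_lhs => rw [bSkipDotSlash]
      rw [if_pos ⟨h1, h2, h3⟩]
    rw [hstep, ih, hbe]
  | case2 i hc =>
    rw [bSkipDotSlash, if_neg hc]
    match hd : cs.drop i with
    | [] => simp [aDropDotSlash]
    | [c] => simp [aDropDotSlash]
    | a :: b :: rest =>
      have hlen : i + 1 < cs.length := by
        have := congrArg List.length hd
        simp at this
        omega
      have ha : cs[i]? = some a := by
        have h0 := congrArg (fun l => l[(0 : Nat)]?) hd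
        simpa using h0
      have hb : cs[i + 1]? = some b := by
        have h1 := congrArg (fun l => l[(1 : Nat)]?) hd
        simpa using h1
      simp only [aDropDotSlash]
      rw [if_neg]
      rintro ⟨hA, hB⟩
      exact hc ⟨hlen, by rw [ha, hA], by rw [hb, hB]⟩

lemma dropSlash_eq (cs : List Char) (i : Nat) :
    aDropSlash (cs.drop i) = cs.drop (bSkipSlash cs i) := by
  induction i using bSkipSlash.induct (cs := cs) with
  | case1 i hc ih =>
    obtain ⟨h1, h2⟩ := hc
    have e2 : cs[i]'(by omega) = '/' := by
      have h' := h2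
      rw [List.getElem?_eq_getElem (by omega)] at h'
      simpa using h'
    have hd : cs.drop i = '/' :: cs.drop (i + 1) := by
      rw [List.drop_eq_getElem_cons (show i < cs.length by omega)]
      simp [e2]
    rw [hd]
    have hstep : aDropSlash ('/' :: cs.drop (i + 1)) = aDropSlash (cs.drop (i + 1)) := by
      simp [aDropSlash]
    have hbe : bSkipSlash cs i = bSkipSlash cs (i + 1) := by
      conv_lhs => rw [bSkipSlash]
      rw [if_pos ⟨h1, h2⟩]
    rw [hstep, ih, hbe]
  | case2 i hc =>
    rw [bSkipSlash, if_neg hc]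
    match hd : cs.drop i with
    | [] => simp [aDropSlash]
    | a :: rest =>
      have hlen : i < cs.length := by
        have := congrArg List.length hd
        simp at this
        omega
      have ha : cs[i]? = some a := by
        have h0 := congrArg (fun l => l[(0 : Nat)]?) hd
        simpa using h0
      simp only [aDropSlash]
      rw [if_neg]
      intro hA
      exact hc ⟨hlen, by rw [ha, hA]⟩

lemma shrink_bounds (cs : List Char) (i j : Nat) :
    i ≤ j → i ≤ bShrink cs i j ∧ bShrink cs i j ≤ j := by
  induction j using bShrink.induct (cs := cs) (i := i) with
  | case1 j hc ih =>
    intro h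
    rw [bShrink, if_pos hc]
    have := ih (by omega)
    omega
  | case2 j hc =>
    intro h
    rw [bShrink, if_neg hc]
    omega

lemma dropTrailing_eq (cs : List Char) (i j : Nat) :
    i ≤ j → j ≤ cs.length →
    aDropTrailing ((cs.drop i).take (j - i)) = (cs.drop i).take (bShrink cs i j - i) := by
  induction j using bShrink.induct (cs := cs) (i := i) with
  | case1 j hc ih =>
    intro hij hj
    obtain ⟨h1, h2⟩ := hc
    set t := (cs.drop i).take (j - i) with ht
    have hlt : t.length = j - i := by
      simp [ht]
      omega
    have hlast : t.getLast? = some '/' := by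
      rw [List.getLast?_eq_getElem?, hlt]
      have e1 : t[j - i - 1]? = (cs.drop i)[j - i - 1]? := by
        rw [ht]
        rw [List.getElem?_take_of_lt (by omega)]
      rw [e1, List.getElem?_drop]
      have : i + (j - i - 1) = j - 1 := by omega
      rw [this, h2]
    have hcond : 1 < t.length ∧ t.getLast? = some '/' := ⟨by omega, hlast⟩
    rw [aDropTrailing, if_pos hcond]
    have hdl : t.dropLast = (cs.drop i).take (j - 1 - i) := by
      rw [List.dropLast_eq_take, hlt, ht, List.take_take]
      congr 1
      omega
    have hbe : bShrink cs i j = bShrink cs i (j - 1) := by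
      conv_lhs => rw [bShrink]
      rw [if_pos ⟨h1, h2⟩]
    rw [hdl, ih (by omega) (by omega), hbe]
  | case2 j hc =>
    intro hij hj
    rw [bShrink, if_neg hc]
    set t := (cs.drop i).take (j - i) with ht
    have hlt : t.length = j - i := by
      simp [ht]
      omega
    rw [aDropTrailing]
    rw [if_neg]
    rintro ⟨hgt, hlast⟩
    apply hc
    constructor
    · omega
    · rw [List.getLast?_eq_getElem?, hlt] at hlast
      have e1 : t[j - i - 1]? = (cs.drop i)[j - i - 1]? := by
        rw [ht, List.getElem?_take_of_lt (by omega)]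
      rw [e1, List.getElem?_drop] at hlast
      have : i + (j - i - 1) = j - 1 := by omega
      rwa [this] at hlast

lemma core (cs : List Char) :
    aDropTrailing (aDropSlash (aDropDotSlash cs)) =
      PySem.List.slice cs (some ((bSkipSlash cs (bSkipDotSlash cs 0) : Nat) : Int))
        (some ((bShrink cs (bSkipSlash cs (bSkipDotSlash cs 0)) cs.length : Nat) : Int)) := by
  set i := bSkipSlash cs (bSkipDotSlash cs 0) with hi
  set j := bShrink cs i cs.length with hj
  have hb1 := skipDotSlash_bounds cs 0 (by omega)
  have hb2 := skipSlash_bounds cs (bSkipDotSlash cs 0) hb1.2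
  have hiL : i ≤ cs.length := hb2.2
  have h1 : aDropDotSlash cs = cs.drop (bSkipDotSlash cs 0) := by
    have := dropDotSlash_eq cs 0
    simpa using this
  have h2 : aDropSlash (cs.drop (bSkipDotSlash cs 0)) = cs.drop i := dropSlash_eq cs _
  rw [h1, h2, PySem.List.slice_natCast]
  have hfull : cs.drop i = (cs.drop i).take (cs.length - i) := by
    rw [List.take_of_length_le]
    simp
  rw [hfull, dropTrailing_eq cs i cs.length hiL (le_refl _), List.take_take]
  have hb := shrink_bounds cs i cs.length hiL
  congr 1
  omega

-- ===== VERDICT (by name: the statement is the Claim_ definition above) =====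
theorem normalize_scope_path_py_spec : Claim_equal_normalize_scope_path_py := by
  intro value _
  unfold Spec_normalize_scope_path_py normalize_scope_path_py normalize_scope_path_py_alt
  match value with
  | none => rfl
  | some s =>
    by_cases h : PySem.Str.strip s = ""
    · simp [h]
    · simp only [h, if_false]
      rw [core]
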